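-- pv_equiv track=rewrite | github.com/palilo815/ps | baekjoon/13000/13022.py | solve
-- ===== SOURCE A (Python) =====
-- def solve(s):
--     i = 0
--     while i < len(s):
--         n = 0
--         while i + n < len(s) and s[i + n] == 'w':
--             n += 1
--
--         if n == 0 or i + 4 * n > len(s):
--             return 0
--
--         o, l, f = i + n, i + 2 * n, i + 3 * n
--         while o < i + 2 * n:
--             if s[o] != 'o' or s[l] != 'l' or s[f] != 'f':
--                 return 0
--             o += 1
--             l += 1
--             f += 1
--         i += 4 * n
--     return 1
-- ===== SOURCE B (Python) =====
-- def solve(s):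
--     # run-length encode s, then check groups in chunks of four
--     groups = []
--     for c in s:
--         if groups and groups[-1][0] == c:
--             groups[-1] = (c, groups[-1][1] + 1)
--         else:
--             groups.append((c, 1))
--     j = 0
--     while j < len(groups):
--         if len(groups) - j < 4:
--             return 0
--         (c0, n0), (c1, n1), (c2, n2), (c3, n3) = groups[j:j + 4]
--         if (c0, c1, c2, c3) != ('w', 'o', 'l', 'f') or not (n0 == n1 == n2 == n3):
--             return 0
--         j += 4
--     return 1
-- ===== Notes on version B (the rewrite author's own statement) =====
-- stated objective: simpler
-- what changed: Replaces A's triple-pointer index scan over the string with a run-length encoding pass followed by a check of the groups in chunks of four (chars w,o,l,f with equal run lengths).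
import Mathlib
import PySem

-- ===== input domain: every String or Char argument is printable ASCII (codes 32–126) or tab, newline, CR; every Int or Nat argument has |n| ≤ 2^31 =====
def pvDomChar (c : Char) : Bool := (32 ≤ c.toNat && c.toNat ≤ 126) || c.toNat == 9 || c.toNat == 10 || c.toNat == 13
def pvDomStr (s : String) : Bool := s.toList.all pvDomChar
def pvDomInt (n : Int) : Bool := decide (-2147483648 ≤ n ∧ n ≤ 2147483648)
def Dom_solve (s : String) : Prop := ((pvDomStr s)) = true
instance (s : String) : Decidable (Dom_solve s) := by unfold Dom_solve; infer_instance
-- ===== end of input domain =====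

-- B replaces A's triple-pointer index scan with a run-length encoding followed by a
-- chunk-of-four group check; objective: simpler, same O(n) cost.

-- ===== PORT A =====
-- inner `while i + n < len(s) and s[i+n] == 'w': n += 1`
def solveWrun (cs : List Char) (i n : Nat) : Nat :=
  if h : i + n < cs.length ∧ cs[i + n]! = 'w' then solveWrun cs i (n + 1) else n
termination_by cs.length - (i + n)
decreasing_by omega

-- inner `while o < i + 2*n: …` checking the o/l/f blocks
def solveOlf (cs : List Char) (o l f stop : Nat) : Bool :=
  if h : o < stop then
    if cs[o]! ≠ 'o' ∨ cs[l]! ≠ 'l' ∨ cs[f]! ≠ 'f' then false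
    else solveOlf cs (o + 1) (l + 1) (f + 1) stop
  else true
termination_by stop - o
decreasing_by omega

-- outer `while i < len(s)` loop
def solveLoop (cs : List Char) (i : Nat) : Int :=
  if h : i < cs.length then
    let n := solveWrun cs i 0
    if h2 : n = 0 ∨ i + 4 * n > cs.length then 0
    else if solveOlf cs (i + n) (i + 2 * n) (i + 3 * n) (i + 2 * n) then
      solveLoop cs (i + 4 * n)
    else 0
  else 1
termination_by cs.length - i
decreasing_by omega

def solve (s : String) : Int := solveLoop s.toList 0

-- ===== PORT B =====
-- one step of the RLE loop; groups kept reversed (head = python's groups[-1]), reversed at the end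
def rleStep (acc : List (Char × Nat)) (c : Char) : List (Char × Nat) :=
  match acc with
  | (c0, n) :: rest => if c0 = c then (c0, n + 1) :: rest else (c, 1) :: (c0, n) :: rest
  | [] => [(c, 1)]

def rle (cs : List Char) : List (Char × Nat) := (cs.foldl rleStep []).reverse

-- python's `while j < len(groups)` chunk loop: take four groups at a time
def chunk4 : List (Char × Nat) → Int
  | [] => 1
  | (c0, n0) :: (c1, n1) :: (c2, n2) :: (c3, n3) :: gs =>
      if c0 = 'w' ∧ c1 = 'o' ∧ c2 = 'l' ∧ c3 = 'f' ∧ n0 = n1 ∧ n1 = n2 ∧ n2 = n3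
      then chunk4 gs else 0
  | _ => 0

def solve_alt (s : String) : Int := chunk4 (rle s.toList)

-- ===== PRECONDITION & SPEC =====
def Spec_solve (s : String) (out : Int) : Prop := out = solve_alt s
instance (s : String) (out : Int) : Decidable (Spec_solve s out) := by unfold Spec_solve; infer_instance

-- ===== CLAIM (what is proved, stated in full; the proofs are below) =====
def Claim_equal_solve : Prop := ∀ (s : String), Dom_solve s → Spec_solve s (solve s)

-- ===== LEMMAS AND PROOFS =====

-- getElem! bridge
theorem getE (cs : List Char) (j : Nat) (h : j < cs.length) : cs[j]! = cs[j] :=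
  getElem!_pos cs j h

theorem getE_drop (cs : List Char) (i x : Nat) (h : x < cs.length - i) :
    (cs.drop i)[x]! = cs[i + x]! := by
  have h1 : x < (cs.drop i).length := by simp; omega
  have h2 : i + x < cs.length := by omega
  rw [getE _ _ h1, getE _ _ h2, List.getElem_drop]

-- spec of the w-run counter
theorem wrun_spec (cs : List Char) (i : Nat) : ∀ (k : Nat), i + k ≤ cs.length →
    (∀ j, j < k → cs[i + j]! = 'w') →
    k ≤ solveWrun cs i k ∧ i + solveWrun cs i k ≤ cs.length ∧
    (∀ j, j < solveWrun cs i k → cs[i + j]! = 'w') ∧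
    (i + solveWrun cs i k < cs.length → cs[i + solveWrun cs i k]! ≠ 'w') := by
  intro k
  induction k using solveWrun.induct (cs := cs) (i := i) with
  | case1 k h ih =>
    intro hle hall
    rw [solveWrun, dif_pos h]
    have := ih (by omega) (by
      intro j hj
      rcases Nat.lt_or_ge j k with hj' | hj'
      · exact hall j hj'
      · have : j = k := by omega
        subst this; exact h.2)
    refine ⟨by omega, this.2.1, this.2.2.1, this.2.2.2⟩
  | case2 k h =>
    intro hle hall
    rw [solveWrun, dif_neg h]
    refine ⟨le_refl _, hle, hall, ?_⟩
    intro hlt hw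
    exact h ⟨hlt, hw⟩

-- spec of the o/l/f checking loop
theorem olf_spec (cs : List Char) (stop : Nat) : ∀ (o l f : Nat),
    (solveOlf cs o l f stop = true ↔
    (∀ j, o + j < stop → cs[o + j]! = 'o' ∧ cs[l + j]! = 'l' ∧ cs[f + j]! = 'f')) := by
  intro o l f
  induction o, l, f using solveOlf.induct (cs := cs) (stop := stop) with
  | case1 o l f h hbad =>
    rw [solveOlf, dif_pos h, if_pos hbad]
    constructor
    · intro hc; exact absurd hc (by simp)
    · intro hall
      have := hall 0 (by omega)
      simp only [Nat.add_zero] at this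
      rcases hbad with hb | hb | hb
      · exact (hb this.1).elim
      · exact (hb this.2.1).elim
      · exact (hb this.2.2).elim
  | case2 o l f h hbad ih =>
    rw [solveOlf, dif_pos h, if_neg hbad]
    rw [not_or, not_or, not_not, not_not, not_not] at hbad
    rw [ih]
    have eo : ∀ (a j : Nat), a + (j + 1) = (a + 1) + j := fun a j => by omega
    constructor
    · intro hall j hj
      rcases j with _ | j
      · simpa using hbad
      · rw [eo o j, eo l j, eo f j]
        exact hall j (by omega)
    · intro hall j hj
      have := hall (j + 1) (by omega)
      rw [eo o j, eo l j, eo f j] at this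
      exact this
  | case3 o l f h =>
    rw [solveOlf, dif_neg h]
    constructor
    · intro _ j hj; omega
    · intro _; rfl

-- a nonempty suffix starting with a non-'w' char makes A return 0
theorem solveLoop_stuck (cs : List Char) (i : Nat) (hi : i < cs.length) (hc : cs[i]! ≠ 'w') :
    solveLoop cs i = 0 := by
  have hz : solveWrun cs i 0 = 0 := by
    rw [solveWrun, dif_neg]
    intro hcontra
    exact hc (by simpa using hcontra.2)
  rw [solveLoop, dif_pos hi]
  simp [hz]

-- ===== B side =====
theorem rleStep_ne_nil (a : List (Char × Nat)) (c : Char) : rleStep a c ≠ [] := by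
  rcases a with _ | ⟨⟨c0, n⟩, rest⟩ <;> simp [rleStep]
  split <;> simp

theorem foldl_frame : ∀ (xs : List Char) (a b : List (Char × Nat)), a ≠ [] →
    List.foldl rleStep (a ++ b) xs = List.foldl rleStep a xs ++ b := by
  intro xs
  induction xs with
  | nil => intro a b ha; rfl
  | cons x xs ih =>
    intro a b ha
    have hstep : rleStep (a ++ b) x = rleStep a x ++ b := by
      rcases a with _ | ⟨⟨c0, n⟩, rest⟩
      · simp at ha
      · simp only [List.cons_append, rleStep]
        split <;> simp
    simp only [List.foldl_cons, hstep]
    exact ih _ _ (rleStep_ne_nil a x)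

theorem foldl_run : ∀ (k : Nat) (xs : List Char) (c : Char) (m : Nat),
    List.foldl rleStep [(c, m)] (List.replicate k c ++ xs) =
    List.foldl rleStep [(c, m + k)] xs := by
  intro k
  induction k with
  | zero => intro xs c m; simp
  | succ k ih =>
    intro xs c m
    simp only [List.replicate_succ, List.cons_append, List.foldl_cons]
    have : rleStep [(c, m)] c = [(c, m + 1)] := by simp [rleStep]
    rw [this, ih, show m + 1 + k = m + (k + 1) from by omega]

-- decomposition of rle on a leading maximal run
theorem rle_run (c : Char) (n : Nat) (ys : List Char) (hn : 1 ≤ n) (hy : ys.head? ≠ some c) :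
    rle (List.replicate n c ++ ys) = (c, n) :: rle ys := by
  unfold rle
  obtain ⟨m, rfl⟩ : ∃ m, n = m + 1 := ⟨n - 1, by omega⟩
  rw [List.replicate_succ, List.cons_append, List.foldl_cons]
  have h1 : rleStep [] c = [(c, 1)] := rfl
  rw [h1, foldl_run]
  rw [show (1 : Nat) + m = m + 1 from Nat.add_comm 1 m]
  rcases ys with _ | ⟨d, zs⟩
  · simp
  · have hdc : d ≠ c := by simpa using hy
    have hcd : ¬ (c = d) := fun e => hdc e.symm
    rw [List.foldl_cons]
    have h2 : rleStep [(c, m + 1)] d = [(d, 1)] ++ [(c, m + 1)] := by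
      simp [rleStep, hcd]
    rw [h2, foldl_frame _ _ _ (by simp)]
    have h3 : List.foldl rleStep [] (d :: zs) = List.foldl rleStep [(d, 1)] zs := by
      simp [rleStep]
    rw [h3]
    simp

-- every nonempty list splits off a maximal head run
theorem run_decomp : ∀ (xs : List Char) (x : Char),
    ∃ r ys, 1 ≤ r ∧ x :: xs = List.replicate r x ++ ys ∧ ys.head? ≠ some x := by
  intro xs
  induction xs with
  | nil => intro x; exact ⟨1, [], by simp⟩
  | cons y ys ih =>
    intro x
    by_cases hxy : y = x
    · subst hxy
      obtain ⟨r, zs, hr, heq, hh⟩ := ih y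
      exact ⟨r + 1, zs, by omega, by rw [List.replicate_succ, List.cons_append, ← heq], hh⟩
    · exact ⟨1, y :: ys, by simp, by simp, by simpa using hxy⟩

theorem rle_cons (x : Char) (xs : List Char) :
    ∃ r ys, 1 ≤ r ∧ x :: xs = List.replicate r x ++ ys ∧ ys.head? ≠ some x ∧
      rle (x :: xs) = (x, r) :: rle ys := by
  obtain ⟨r, ys, hr, heq, hh⟩ := run_decomp xs x
  exact ⟨r, ys, hr, heq, hh, by rw [heq, rle_run _ _ _ hr hh]⟩

theorem rle_inv (xs : List Char) (c : Char) (k : Nat) (gs : List (Char × Nat))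
    (h : rle xs = (c, k) :: gs) :
    ∃ ys, xs = List.replicate k c ++ ys ∧ ys.head? ≠ some c ∧ rle ys = gs ∧ 1 ≤ k := by
  rcases xs with _ | ⟨x, xs⟩
  · simp [rle] at h
  · obtain ⟨r, ys, hr, heq, hh, hrle⟩ := rle_cons x xs
    rw [hrle] at h
    injection h with h1 h2
    injection h1 with hc hk
    subst hc; subst hk; subst h2
    exact ⟨ys, heq, hh, rfl, hr⟩

-- chunk4 is 0 when the first group's char is not 'w'
theorem chunk4_head_ne (c : Char) (m : Nat) (gs : List (Char × Nat)) (hc : c ≠ 'w') :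
    chunk4 ((c, m) :: gs) = 0 := by
  rcases gs with _ | ⟨⟨c1, n1⟩, _ | ⟨⟨c2, n2⟩, _ | ⟨⟨c3, n3⟩, gs⟩⟩⟩ <;>
    simp [chunk4, hc]

-- if chunk4 of ('w',n) :: rle rest is nonzero, rest starts with o^n l^n f^n
theorem chunk4_w_ne (n : Nat) (rest : List Char)
    (h : chunk4 (('w', n) :: rle rest) ≠ 0) :
    ∃ ys, rest = List.replicate n 'o' ++ (List.replicate n 'l' ++ (List.replicate n 'f' ++ ys)) ∧
      ys.head? ≠ some 'f' ∧ chunk4 (('w', n) :: rle rest) = chunk4 (rle ys) := by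
  rcases hG : rle rest with _ | ⟨⟨c1, n1⟩, _ | ⟨⟨c2, n2⟩, _ | ⟨⟨c3, n3⟩, G⟩⟩⟩
  · rw [hG] at h; simp [chunk4] at h
  · rw [hG] at h; simp [chunk4] at h
  · rw [hG] at h; simp [chunk4] at h
  · rw [hG] at h
    by_cases hcond : c1 = 'o' ∧ c2 = 'l' ∧ c3 = 'f' ∧ n = n1 ∧ n1 = n2 ∧ n2 = n3
    case neg =>
      exfalso; apply h
      simp only [chunk4]
      rw [if_neg]
      intro hc
      exact hcond ⟨hc.2.1, hc.2.2.1, hc.2.2.2.1, hc.2.2.2.2.1, hc.2.2.2.2.2.1, hc.2.2.2.2.2.2⟩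
    case pos =>
      obtain ⟨hc1, hc2, hc3, e1, e2, e3⟩ := hcond
      subst hc1; subst hc2; subst hc3
      cases e1; cases e2; cases e3
      obtain ⟨ys1, hr1, hh1, hrle1, _⟩ := rle_inv rest 'o' n _ hG
      obtain ⟨ys2, hr2, hh2, hrle2, _⟩ := rle_inv ys1 'l' n _ hrle1
      obtain ⟨ys3, hr3, hh3, hrle3, _⟩ := rle_inv ys2 'f' n _ hrle2
      refine ⟨ys3, by rw [hr1, hr2, hr3], hh3, ?_⟩
      simp [chunk4, hrle3]

-- replicate prefix decomposition from pointwise equality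
theorem take_decomp (t : List Char) (n : Nat) (c : Char) (hn : n ≤ t.length)
    (h1 : ∀ j, j < n → t[j]! = c) : t = List.replicate n c ++ t.drop n := by
  conv_lhs => rw [← List.take_append_drop n t]
  congr 1
  apply List.ext_getElem (by simp [hn])
  intro j hj _
  have hjn : j < n := by simpa [hn] using hj
  rw [List.getElem_take, List.getElem_replicate, ← getE _ _ (by omega)]
  exact h1 j hjn


theorem rep_get (c : Char) (n j : Nat) (zs : List Char) (hj : j < n) :
    (List.replicate n c ++ zs)[j]! = c := by
  rw [getE _ _ (by simp; omega), List.getElem_append_left (by simp [hj]), List.getElem_replicate]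

theorem rep_shift (c : Char) (n j : Nat) (zs : List Char) (hj : j < zs.length) :
    (List.replicate n c ++ zs)[n + j]! = zs[j]! := by
  rw [getE _ _ (by simp; omega), getE _ _ hj]
  rw [List.getElem_append_right (by simp)]
  congr 1
  simp

theorem head?_drop' (cs : List Char) (k : Nat) (h : k < cs.length) :
    (cs.drop k).head? = some (cs[k]!) := by
  rw [getE _ _ h]
  rw [List.head?_drop]
  simp [List.getElem?_eq_getElem h]

theorem drop_dec (cs : List Char) (a b : Nat) : (cs.drop a).drop b = cs.drop (a + b) := by
  rw [List.drop_drop, Nat.add_comm]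

theorem solveLoop_eq (cs : List Char) (i : Nat) (hi : i < cs.length) :
    solveLoop cs i =
      (if _h2 : solveWrun cs i 0 = 0 ∨ i + 4 * solveWrun cs i 0 > cs.length then 0
       else if solveOlf cs (i + solveWrun cs i 0) (i + 2 * solveWrun cs i 0)
              (i + 3 * solveWrun cs i 0) (i + 2 * solveWrun cs i 0) then
         solveLoop cs (i + 4 * solveWrun cs i 0)
       else 0) := by
  rw [solveLoop, dif_pos hi]

theorem main_loop (cs : List Char) : ∀ i, solveLoop cs i = chunk4 (rle (cs.drop i)) := by
  have H : ∀ d i, cs.length - i ≤ d → solveLoop cs i = chunk4 (rle (cs.drop i)) := by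
    intro d
    induction d with
    | zero =>
      intro i hle
      rw [solveLoop, dif_neg (by omega)]
      rw [List.drop_eq_nil_of_le (by omega)]
      rfl
    | succ d ih =>
      intro i hle
      by_cases hi : i < cs.length
      case neg =>
        rw [solveLoop, dif_neg hi]
        rw [List.drop_eq_nil_of_le (by omega)]
        rfl
      case pos =>
        rw [solveLoop_eq cs i hi]
        obtain ⟨-, hble, hw1, hw2⟩ := wrun_spec cs i 0 (by omega) (by intro j hj; omega)
        set n := solveWrun cs i 0 with hn
        have hlen_t : (cs.drop i).length = cs.length - i := by simp
        by_cases hn0 : n = 0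
        case pos =>
          rw [dif_pos (Or.inl hn0)]
          rcases ht : cs.drop i with _ | ⟨dd, t'⟩
          · exfalso; rw [ht] at hlen_t; simp at hlen_t; omega
          · have hdne : dd ≠ 'w' := by
              have h0 : (cs.drop i).head? = some (cs[i]!) := head?_drop' cs i hi
              rw [ht, List.head?_cons] at h0
              have hne := hw2 (by omega)
              rw [show i + n = i from by omega] at hne
              rw [Option.some.inj h0]; exact hne
            obtain ⟨r, ys, hr, heq, hh, hrle⟩ := rle_cons dd t'
            rw [hrle, chunk4_head_ne dd r _ hdne]
        case neg =>
          have hdec : cs.drop i = List.replicate n 'w' ++ cs.drop (i + n) := by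
            have h1 := take_decomp (cs.drop i) n 'w' (by omega)
              (by intro j hj; rw [getE_drop cs i j (by omega)]; exact hw1 j hj)
            rw [drop_dec] at h1
            exact h1
          have hhead : (cs.drop (i + n)).head? ≠ some 'w' := by
            rcases Nat.lt_or_ge (i + n) cs.length with hlt | hge
            · rw [head?_drop' cs (i + n) hlt]
              intro hcon
              exact hw2 hlt (by simpa using hcon)
            · rw [List.drop_eq_nil_of_le (by omega)]
              simp
          have hrle_t : rle (cs.drop i) = ('w', n) :: rle (cs.drop (i + n)) := by
            rw [hdec, rle_run 'w' n _ (by omega) hhead]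
          rw [hrle_t]
          by_cases hbig : i + 4 * n > cs.length
          case pos =>
            rw [dif_pos (Or.inr hbig)]
            by_contra hne
            obtain ⟨ys, hys, -, -⟩ := chunk4_w_ne n (cs.drop (i + n)) (fun h => hne h.symm)
            have hlys := congrArg List.length hys
            simp at hlys
            omega
          case neg =>
            rw [dif_neg (by omega : ¬ (n = 0 ∨ i + 4 * n > cs.length))]
            have hiff := olf_spec cs (i + 2 * n) (i + n) (i + 2 * n) (i + 3 * n)
            by_cases holf : solveOlf cs (i + n) (i + 2 * n) (i + 3 * n) (i + 2 * n) = true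
            case neg =>
              rw [if_neg holf]
              by_contra hne
              obtain ⟨ys, hys, -, -⟩ := chunk4_w_ne n (cs.drop (i + n)) (fun h => hne h.symm)
              have hylen := congrArg List.length hys
              simp at hylen
              apply holf
              rw [hiff]
              intro j hj
              have hj' : j < n := by omega
              refine ⟨?_, ?_, ?_⟩
              · rw [← getE_drop cs (i + n) j (by omega), hys]
                exact rep_get 'o' n j _ hj'
              · rw [show i + 2 * n + j = (i + n) + (n + j) from by omega,
                    ← getE_drop cs (i + n) (n + j) (by omega), hys,
                    rep_shift 'o' n j _ (by simp only [List.length_append, List.length_replicate]; omega)]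
                exact rep_get 'l' n j _ hj'
              · rw [show i + 3 * n + j = (i + n) + (n + (n + j)) from by omega,
                    ← getE_drop cs (i + n) (n + (n + j)) (by omega), hys,
                    rep_shift 'o' n (n + j) _ (by simp only [List.length_append, List.length_replicate]; omega),
                    rep_shift 'l' n j _ (by simp only [List.length_append, List.length_replicate]; omega)]
                exact rep_get 'f' n j _ hj'
            case pos =>
              rw [if_pos holf]
              have hpt := hiff.1 holf
              have ho : ∀ j, j < n → cs[i + n + j]! = 'o' := fun j hj => (hpt j (by omega)).1
              have hl : ∀ j, j < n → cs[i + 2 * n + j]! = 'l' := fun j hj => (hpt j (by omega)).2.1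
              have hf : ∀ j, j < n → cs[i + 3 * n + j]! = 'f' := fun j hj => (hpt j (by omega)).2.2
              have hdo : cs.drop (i + n) = List.replicate n 'o' ++ cs.drop (i + 2 * n) := by
                have h1 := take_decomp (cs.drop (i + n)) n 'o' (by simp; omega)
                  (by intro j hj; rw [getE_drop cs (i + n) j (by omega)]; exact ho j hj)
                rw [drop_dec, show i + n + n = i + 2 * n from by omega] at h1
                exact h1
              have hdl : cs.drop (i + 2 * n) = List.replicate n 'l' ++ cs.drop (i + 3 * n) := by
                have h1 := take_decomp (cs.drop (i + 2 * n)) n 'l' (by simp; omega)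
                  (by intro j hj; rw [getE_drop cs (i + 2 * n) j (by omega)]; exact hl j hj)
                rw [drop_dec, show i + 2 * n + n = i + 3 * n from by omega] at h1
                exact h1
              have hdf : cs.drop (i + 3 * n) = List.replicate n 'f' ++ cs.drop (i + 4 * n) := by
                have h1 := take_decomp (cs.drop (i + 3 * n)) n 'f' (by simp; omega)
                  (by intro j hj; rw [getE_drop cs (i + 3 * n) j (by omega)]; exact hf j hj)
                rw [drop_dec, show i + 3 * n + n = i + 4 * n from by omega] at h1
                exact h1
              have hh_l : (cs.drop (i + 2 * n)).head? = some 'l' := by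
                rw [head?_drop' cs _ (by omega)]
                have h0 := hl 0 (by omega)
                rw [show i + 2 * n + 0 = i + 2 * n from by omega] at h0
                rw [h0]
              have hh_f : (cs.drop (i + 3 * n)).head? = some 'f' := by
                rw [head?_drop' cs _ (by omega)]
                have h0 := hf 0 (by omega)
                rw [show i + 3 * n + 0 = i + 3 * n from by omega] at h0
                rw [h0]
              by_cases h4 : (cs.drop (i + 4 * n)).head? = some 'f'
              case neg =>
                have hrest : rle (cs.drop (i + n)) =
                    ('o', n) :: ('l', n) :: ('f', n) :: rle (cs.drop (i + 4 * n)) := by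
                  rw [hdo, rle_run 'o' n _ (by omega) (by rw [hh_l]; decide),
                      hdl, rle_run 'l' n _ (by omega) (by rw [hh_f]; decide),
                      hdf, rle_run 'f' n _ (by omega) h4]
                rw [hrest]
                have hch : chunk4 (('w', n) :: ('o', n) :: ('l', n) :: ('f', n) ::
                    rle (cs.drop (i + 4 * n))) = chunk4 (rle (cs.drop (i + 4 * n))) := by
                  simp [chunk4]
                rw [hch]
                exact ih (i + 4 * n) (by omega)
              case pos =>
                obtain ⟨tl, htl⟩ : ∃ tl, cs.drop (i + 4 * n) = 'f' :: tl := by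
                  rcases hc : cs.drop (i + 4 * n) with _ | ⟨x, tl⟩
                  · rw [hc] at h4; simp at h4
                  · rw [hc] at h4; simp at h4; exact ⟨tl, by rw [h4]⟩
                obtain ⟨k, ys5, hk, hkeq, hkh⟩ := run_decomp tl 'f'
                have hdf' : cs.drop (i + 3 * n) = List.replicate (n + k) 'f' ++ ys5 := by
                  rw [hdf, htl, hkeq, ← List.append_assoc, ← List.replicate_add]
                have hrest : rle (cs.drop (i + n)) =
                    ('o', n) :: ('l', n) :: ('f', n + k) :: rle ys5 := by
                  rw [hdo, rle_run 'o' n _ (by omega) (by rw [hh_l]; decide),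
                      hdl, rle_run 'l' n _ (by omega) (by rw [hh_f]; decide),
                      hdf', rle_run 'f' (n + k) _ (by omega) hkh]
                rw [hrest]
                have hlen4 : 0 < cs.length - (i + 4 * n) := by
                  have h1 := congrArg List.length htl
                  simp at h1
                  omega
                have hA : solveLoop cs (i + 4 * n) = 0 := by
                  apply solveLoop_stuck
                  · omega
                  · have h1 := getE_drop cs (i + 4 * n) 0 hlen4
                    rw [htl] at h1
                    have h2 : ('f' :: tl)[0]! = 'f' := by rw [getE _ _ (by simp)]; exact List.getElem_cons_zero _ _ _
                    have h3 : cs[i + 4 * n + 0]! = 'f' := by rw [← h1, h2]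
                    rw [Nat.add_zero] at h3
                    rw [h3]
                    decide
                rw [hA]
                have hc0 : chunk4 (('w', n) :: ('o', n) :: ('l', n) :: ('f', n + k) ::
                    rle ys5) = 0 := by
                  simp only [chunk4]
                  rw [if_neg]
                  intro hcc
                  have := hcc.2.2.2.2.2.2
                  omega
                rw [hc0]
  intro i
  exact H (cs.length - i) i (le_refl _)

-- ===== VERDICT (by name: the statement is the Claim_ definition above) =====
theorem solve_spec : Claim_equal_solve := by
  intro s _
  unfold Spec_solve solve solve_alt
  simpa using main_loop s.toList 0
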